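-- pv_equiv track=rewrite | github.com/jeongjinmyung/coding_test | 프로그래머스/3/87391. 공 이동 시뮬레이션/공 이동 시뮬레이션.py | solution
-- ===== SOURCE A (Python) =====
-- def solution(n, m, x, y, queries):
--     min_x, max_x = x, x
--     min_y, max_y = y, y
--
--     for cmd, d in reversed(queries):
--         if cmd == 0:
--             max_y = max_y+d if max_y+d < m else m-1
--             if min_y > 0:
--                 min_y += d
--         elif cmd == 1:
--             min_y = min_y-d if min_y-d >= 0 else 0
--             if max_y < m-1:
--                 max_y -= d
--         elif cmd == 2:
--             max_x = d+max_x if max_x+d < n else n-1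
--             if min_x > 0:
--                 min_x += d
--         elif cmd == 3:
--             min_x = min_x-d if min_x-d >= 0 else 0
--             if max_x < n-1:
--                 max_x -= d
--
--         if min_x >= n or max_x < 0 or min_y >= m or max_y < 0:
--             return 0
--
--     return (max_x - min_x + 1) * (max_y - min_y + 1)
-- ===== SOURCE B (Python) =====
-- def _axis(lo, hi, bound, up, down, rev):
--     # 1-D interval run: apply only this axis's two commands; None = collapsed at some step
--     for cmd, d in rev:
--         if cmd == up:
--             lo, hi = (lo + d if lo > 0 else lo), (hi + d if hi + d < bound else bound - 1)
--         elif cmd == down: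
--             lo, hi = (lo - d if lo - d >= 0 else 0), (hi - d if hi < bound - 1 else hi)
--         if lo >= bound or hi < 0:
--             return None
--     return (lo, hi)
--
-- def solution(n, m, x, y, queries):
--     rev = queries[::-1]
--     rx = _axis(x, x, n, 2, 3, rev)
--     ry = _axis(y, y, m, 0, 1, rev)
--     if rx is None or ry is None:
--         return 0
--     return (rx[1] - rx[0] + 1) * (ry[1] - ry[0] + 1)
-- ===== Notes on version B (the rewrite author's own statement) =====
-- stated objective: simpler
-- what changed: Replaces the single interleaved four-variable loop with early return by a reusable 1-D interval helper run once per axis (x with commands 2/3, y with 0/1) plus a combine step.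
import Mathlib
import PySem

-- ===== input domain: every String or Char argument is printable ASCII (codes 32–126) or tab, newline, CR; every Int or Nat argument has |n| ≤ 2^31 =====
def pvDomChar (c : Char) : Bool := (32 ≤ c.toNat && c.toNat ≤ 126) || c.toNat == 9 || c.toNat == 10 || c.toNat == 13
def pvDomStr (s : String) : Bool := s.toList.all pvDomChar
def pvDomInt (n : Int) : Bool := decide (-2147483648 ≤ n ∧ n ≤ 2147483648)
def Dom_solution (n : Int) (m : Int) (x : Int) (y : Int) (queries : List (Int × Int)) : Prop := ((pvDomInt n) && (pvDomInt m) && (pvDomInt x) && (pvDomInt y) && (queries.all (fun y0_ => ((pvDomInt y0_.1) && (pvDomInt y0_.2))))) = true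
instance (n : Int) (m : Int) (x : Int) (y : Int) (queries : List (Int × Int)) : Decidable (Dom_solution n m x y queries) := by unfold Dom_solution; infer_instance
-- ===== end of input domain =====

-- B replaces A's single interleaved four-variable loop (with early return) by a 1-D interval
-- helper run once per axis plus a combine step; objective: simpler decomposition (no speed claim).

-- ===== PORT A =====
-- the for-loop over reversed(queries) with its early 'return 0'
def solGoA (n m : Int) : Int → Int → Int → Int → List (Int × Int) → Int
  | minx, maxx, miny, maxy, [] => (maxx - minx + 1) * (maxy - miny + 1)
  | minx, maxx, miny, maxy, (cmd, d) :: rest =>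
    let st :=
      if cmd = 0 then
        (minx, maxx, (if miny > 0 then miny + d else miny),
         (if maxy + d < m then maxy + d else m - 1))
      else if cmd = 1 then
        (minx, maxx, (if miny - d ≥ 0 then miny - d else 0),
         (if maxy < m - 1 then maxy - d else maxy))
      else if cmd = 2 then
        ((if minx > 0 then minx + d else minx),
         (if maxx + d < n then d + maxx else n - 1), miny, maxy)
      else if cmd = 3 then
        ((if minx - d ≥ 0 then minx - d else 0),
         (if maxx < n - 1 then maxx - d else maxx), miny, maxy)
      else (minx, maxx, miny, maxy)
    if st.1 ≥ n ∨ st.2.1 < 0 ∨ st.2.2.1 ≥ m ∨ st.2.2.2 < 0 then 0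
    else solGoA n m st.1 st.2.1 st.2.2.1 st.2.2.2 rest

def solution (n : Int) (m : Int) (x : Int) (y : Int) (queries : List (Int × Int)) : Int :=
  solGoA n m x x y y queries.reverse

-- ===== PORT B =====
-- the 1-D helper _axis: run one axis's interval through the reversed queries; none = collapsed
def solAxis (bound up down : Int) : Int → Int → List (Int × Int) → Option (Int × Int)
  | lo, hi, [] => some (lo, hi)
  | lo, hi, (cmd, d) :: rest =>
    let st :=
      if cmd = up then
        ((if lo > 0 then lo + d else lo), (if hi + d < bound then hi + d else bound - 1))
      else if cmd = down then
        ((if lo - d ≥ 0 then lo - d else 0), (if hi < bound - 1 then hi - d else hi))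
      else (lo, hi)
    if st.1 ≥ bound ∨ st.2 < 0 then none
    else solAxis bound up down st.1 st.2 rest

def solution_alt (n : Int) (m : Int) (x : Int) (y : Int) (queries : List (Int × Int)) : Int :=
  match solAxis n 2 3 x x queries.reverse, solAxis m 0 1 y y queries.reverse with
  | some (lx, hx), some (ly, hy) => (hx - lx + 1) * (hy - ly + 1)
  | _, _ => 0

-- ===== PRECONDITION & SPEC =====
def Spec_solution (n : Int) (m : Int) (x : Int) (y : Int) (queries : List (Int × Int)) (out : Int) : Prop := out = solution_alt n m x y queries
instance (n : Int) (m : Int) (x : Int) (y : Int) (queries : List (Int × Int)) (out : Int) : Decidable (Spec_solution n m x y queries out) := by unfold Spec_solution; infer_instance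

-- ===== CLAIM (what is proved, stated in full; the proofs are below) =====
def Claim_equal_solution : Prop := ∀ (n : Int) (m : Int) (x : Int) (y : Int) (queries : List (Int × Int)), Dom_solution n m x y queries → Spec_solution n m x y queries (solution n m x y queries)

-- ===== LEMMAS AND PROOFS =====

-- combine the two axis results (proof-only helper; mirrors the match in solution_alt)
def solComb : Option (Int × Int) → Option (Int × Int) → Int
  | some (lx, hx), some (ly, hy) => (hx - lx + 1) * (hy - ly + 1)
  | _, _ => 0

theorem solComb_none_left (o : Option (Int × Int)) : solComb none o = 0 := by
  cases o <;> rfl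

theorem solComb_none_right (o : Option (Int × Int)) : solComb o none = 0 := by
  rcases o with _ | ⟨_, _⟩ <;> rfl

-- one loop step: the interleaved collapse test splits into the two per-axis tests
theorem solCombStep (c c1 c2 : Prop) [Decidable c] [Decidable c1] [Decidable c2]
    (hc : c ↔ c1 ∨ c2) (r : Int) (o1 o2 : Option (Int × Int)) (hr : r = solComb o1 o2) :
    (if c then 0 else r) = solComb (if c1 then none else o1) (if c2 then none else o2) := by
  by_cases h1 : c1 <;> by_cases h2 : c2 <;>
    simp [h1, h2, hc, hr, solComb_none_left, solComb_none_right]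

-- core invariant: the interleaved loop equals the two axis runs combined
theorem solGoA_eq_axes (n m : Int) (l : List (Int × Int)) :
    ∀ minx maxx miny maxy : Int,
      solGoA n m minx maxx miny maxy l =
        solComb (solAxis n 2 3 minx maxx l) (solAxis m 0 1 miny maxy l) := by
  induction l with
  | nil => intro minx maxx miny maxy; simp [solGoA, solAxis, solComb]
  | cons q rest ih =>
    obtain ⟨cmd, d⟩ := q
    intro minx maxx miny maxy
    by_cases h0 : cmd = 0
    · subst h0
      simp only [solGoA, solAxis]
      norm_num
      exact solCombStep _ _ _ (by tauto) _ _ _ (ih _ _ _ _)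
    · by_cases h1 : cmd = 1
      · subst h1
        simp only [solGoA, solAxis]
        norm_num
        exact solCombStep _ _ _ (by tauto) _ _ _ (ih _ _ _ _)
      · by_cases h2 : cmd = 2
        · subst h2
          simp only [solGoA, solAxis]
          norm_num
          rw [Int.add_comm d maxx]
          exact solCombStep _ _ _ (by tauto) _ _ _ (ih _ _ _ _)
        · by_cases h3 : cmd = 3
          · subst h3
            simp only [solGoA, solAxis]
            norm_num
            exact solCombStep _ _ _ (by tauto) _ _ _ (ih _ _ _ _)
          · simp only [solGoA, solAxis, if_neg h0, if_neg h1, if_neg h2, if_neg h3]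
            exact solCombStep _ _ _ (by tauto) _ _ _ (ih _ _ _ _)

theorem solution_alt_eq_comb (n m x y : Int) (queries : List (Int × Int)) :
    solution_alt n m x y queries =
      solComb (solAxis n 2 3 x x queries.reverse) (solAxis m 0 1 y y queries.reverse) := by
  unfold solution_alt
  rcases solAxis n 2 3 x x queries.reverse with _ | ⟨lx, hx⟩ <;>
    rcases solAxis m 0 1 y y queries.reverse with _ | ⟨ly, hy⟩ <;> rfl

-- ===== VERDICT (by name: the statement is the Claim_ definition above) =====
theorem solution_spec : Claim_equal_solution := by
  intro n m x y queries _
  unfold Spec_solution solution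
  rw [solution_alt_eq_comb]
  exact solGoA_eq_axes n m queries.reverse x x y y
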